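-- pv_equiv track=rewrite | github.com/louieyan/CS61A | ex.py | longest_increasing_suffix
-- ===== SOURCE A (Python) =====
-- def longest_increasing_suffix(n):
--     """
--     Return the longest increasing suffix of a positive integer n.
--     Parameters:
--     m: max value
--     suffix: suffix
--     k: scaling constant
--     """
--     m, suffix, k = 10, 0, 1
--     while n:
--         n, last = n // 10, n % 10
--         if last < m:
--             m, suffix, k = last, suffix + last * k, 10 * k
--         else:
--             return suffix
--     return suffix
-- ===== SOURCE B (Python) =====
-- def longest_increasing_suffix(n):
--     """Return the longest increasing suffix of a positive integer n.
--
--     Two-phase approach: materialize the decimal digits (low to high),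
--     count how many form a strictly decreasing run, then cut n there with a modulus.
--     """
--     digits = []
--     m = n
--     while m > 0:
--         digits.append(m % 10)
--         m //= 10
--     k = 0
--     prev = 10
--     for d in digits:
--         if d >= prev:
--             break
--         prev = d
--         k += 1
--     return n % 10 ** k
-- ===== Notes on version B (the rewrite author's own statement) =====
-- stated objective: alternative
-- what changed: A fuses everything into one loop carrying three accumulators (max digit, suffix value, power-of-ten scale); B instead materializes the decimal digit list, counts the length k of the strictly decreasing low-to-high digit run, and returns n modulo the corresponding power of ten as a closed form. Pre_ excludes negative n, on which A's values are artefacts of Python floor division and the docstring restricts the function to positive integers.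
-- outside the precondition, e.g. on longest_increasing_suffix(-123): A returns 7, B returns 0
import Mathlib
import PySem

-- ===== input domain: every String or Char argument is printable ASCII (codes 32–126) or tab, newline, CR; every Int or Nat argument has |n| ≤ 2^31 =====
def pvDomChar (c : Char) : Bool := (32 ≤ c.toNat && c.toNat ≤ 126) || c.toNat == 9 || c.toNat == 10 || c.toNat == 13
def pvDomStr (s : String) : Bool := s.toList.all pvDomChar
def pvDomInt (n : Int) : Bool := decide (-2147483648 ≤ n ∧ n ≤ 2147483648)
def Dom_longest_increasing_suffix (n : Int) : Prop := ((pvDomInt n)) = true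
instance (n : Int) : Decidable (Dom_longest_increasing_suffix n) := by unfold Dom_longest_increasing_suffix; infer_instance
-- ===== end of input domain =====

-- B changes the decomposition: digit list + run length + closed-form modulus instead of A's
-- fused three-accumulator loop (objective: alternative; return values proved equal for n ≥ 0).

-- termination helper used by the ports/helpers below
theorem pv_fdiv10_toNat_lt (m : Int) (h : 0 < m) :
    (PySem.Int.floordiv m 10).toNat < m.toNat := by
  rw [PySem.Int.floordiv_eq_ediv_of_pos (by norm_num)]
  omega

-- ===== PORT A =====
-- the 'while n:' loop of A; fuel 64 is enough for every |n| ≤ 2^31 (both signs reach n = 0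
-- or the early return within at most 34 iterations)
def lisA_loop (fuel : Nat) (n m suffix k : Int) : Int :=
  match fuel with
  | 0 => suffix
  | fuel + 1 =>
    if n ≠ 0 then
      let n' := PySem.Int.floordiv n 10
      let last := PySem.Int.mod n 10
      if last < m then
        lisA_loop fuel n' last (suffix + last * k) (10 * k)
      else
        suffix
    else
      suffix

def longest_increasing_suffix (n : Int) : Int := lisA_loop 64 n 10 0 1

-- ===== PORT B =====
-- 'while m > 0: digits.append(m % 10); m //= 10'
def bDigits (m : Int) (acc : List Int) : List Int :=
  if _h : 0 < m then
    bDigits (PySem.Int.floordiv m 10) (acc ++ [PySem.Int.mod m 10])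
  else
    acc
termination_by m.toNat
decreasing_by exact pv_fdiv10_toNat_lt m _h

-- 'for d in digits: if d >= prev: break; prev = d; k += 1'
def bScan (ds : List Int) (prev k : Int) : Int :=
  match ds with
  | [] => k
  | d :: t => if prev ≤ d then k else bScan t d (k + 1)

def longest_increasing_suffix_alt (n : Int) : Int :=
  let digits := bDigits n []
  let k := bScan digits 10 0
  PySem.Int.mod n (10 ^ k.toNat)

-- ===== PRECONDITION & SPEC =====
-- Pre_ excludes negative n: the docstring restricts the function to positive integers, and
-- A's values on negative n (e.g. 7 for -123) are artefacts of Python floor division.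
def Pre_longest_increasing_suffix (n : Int) : Prop := 0 ≤ n
instance (n : Int) : Decidable (Pre_longest_increasing_suffix n) := by
  unfold Pre_longest_increasing_suffix; infer_instance

def pvWitness_longest_increasing_suffix : Int := 63134

def Spec_longest_increasing_suffix (n : Int) (out : Int) : Prop := out = longest_increasing_suffix_alt n
instance (n : Int) (out : Int) : Decidable (Spec_longest_increasing_suffix n out) := by
  unfold Spec_longest_increasing_suffix; infer_instance

-- ===== CLAIM (what is proved, stated in full; the proofs are below) =====
def Claim_equal_longest_increasing_suffix : Prop := ∀ (n : Int), Dom_longest_increasing_suffix n → Pre_longest_increasing_suffix n → Spec_longest_increasing_suffix n (longest_increasing_suffix n)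

-- ===== LEMMAS AND PROOFS =====

-- reference function: the value of the maximal strictly decreasing (low-to-high) digit run of n
-- whose first digit is below m
def pvCore (n m : Int) : Int :=
  if h : 0 < n ∧ PySem.Int.mod n 10 < m then
    PySem.Int.mod n 10 + 10 * pvCore (PySem.Int.floordiv n 10) (PySem.Int.mod n 10)
  else
    0
termination_by n.toNat
decreasing_by exact pv_fdiv10_toNat_lt n h.1

theorem lisA_loop_eq_core (fuel : Nat) :
    ∀ (n m s k : Int), 0 ≤ n → n < 10 ^ fuel →
      lisA_loop fuel n m s k = s + k * pvCore n m := by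
  induction fuel with
  | zero =>
    intro n m s k h0 hlt
    have hn : n = 0 := by simpa using (by omega : n = 0)
    subst hn
    rw [lisA_loop, pvCore]
    simp
  | succ f ih =>
    intro n m s k h0 hlt
    rw [lisA_loop]
    by_cases hn : n = 0
    · subst hn
      rw [pvCore]
      simp
    · have hpos : 0 < n := lt_of_le_of_ne h0 (Ne.symm hn)
      simp only [if_pos hn, ne_eq]
      set d := PySem.Int.mod n 10 with hd
      set n' := PySem.Int.floordiv n 10 with hn'
      by_cases hdm : d < m
      · have hn'0 : 0 ≤ n' := by
          rw [hn', PySem.Int.floordiv_eq_ediv_of_pos (by norm_num)]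
          positivity
        have hn'lt : n' < 10 ^ f := by
          have := (PySem.Int.floordiv_lt_iff_lt_mul (a := n) (b := 10) (q := 10 ^ f)
            (by norm_num)).mpr
          rw [hn']
          apply this
          calc n < 10 ^ (f + 1) := hlt
            _ = 10 ^ f * 10 := by ring
        rw [if_pos hdm, ih n' d (s + d * k) (10 * k) hn'0 hn'lt]
        conv_rhs => rw [pvCore, dif_pos ⟨hpos, hdm⟩]
        ring
      · rw [if_neg hdm]
        conv_rhs => rw [pvCore, dif_neg (by tauto)]
        ring

theorem bDigits_acc_eq : ∀ (N : Nat) (m : Int), m.toNat ≤ N →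
    ∀ acc, bDigits m acc = acc ++ bDigits m [] := by
  intro N
  induction N with
  | zero =>
    intro m hm acc
    have : ¬ 0 < m := by omega
    rw [bDigits, dif_neg this, bDigits, dif_neg this]
    simp
  | succ N ih =>
    intro m hm acc
    by_cases hp : 0 < m
    · have hlt := pv_fdiv10_toNat_lt m hp
      have hle : (PySem.Int.floordiv m 10).toNat ≤ N := by omega
      rw [bDigits, dif_pos hp, ih _ hle]
      conv_rhs => rw [bDigits, dif_pos hp, ih _ hle]
      simp
    · rw [bDigits, dif_neg hp, bDigits, dif_neg hp]
      simp

theorem bDigits_pos (m : Int) (h : 0 < m) :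
    bDigits m [] = PySem.Int.mod m 10 :: bDigits (PySem.Int.floordiv m 10) [] := by
  rw [bDigits, dif_pos h, bDigits_acc_eq (PySem.Int.floordiv m 10).toNat _ le_rfl]
  simp

theorem bScan_shift (ds : List Int) : ∀ prev k, bScan ds prev k = k + bScan ds prev 0 := by
  induction ds with
  | nil => intro prev k; simp [bScan]
  | cons d t ih =>
    intro prev k
    by_cases h : prev ≤ d
    · simp [bScan, if_pos h]
    · rw [bScan, if_neg h, bScan, if_neg h, ih d (k + 1), ih d (0 + 1)]
      ring

theorem bScan_nonneg (ds : List Int) : ∀ prev k, 0 ≤ k → 0 ≤ bScan ds prev k := by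
  induction ds with
  | nil => intro prev k hk; simpa [bScan] using hk
  | cons d t ih =>
    intro prev k hk
    by_cases h : prev ≤ d
    · simpa [bScan, if_pos h] using hk
    · rw [bScan, if_neg h]
      exact ih d (k + 1) (by omega)

theorem pv_mod_tenpow_succ (n' d : Int) (c : Nat) (hd0 : 0 ≤ d) (hd : d < 10) :
    (n' * 10 + d) % (10 ^ (c + 1)) = (n' % 10 ^ c) * 10 + d := by
  have hP : (0 : Int) < 10 ^ c := by positivity
  have hsplit : n' * 10 + d = ((n' % 10 ^ c) * 10 + d) + 10 ^ (c + 1) * (n' / 10 ^ c) := by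
    have h : 10 ^ c * (n' / 10 ^ c) + n' % 10 ^ c = n' := Int.ediv_add_emod n' (10 ^ c)
    have hp : (10 : Int) ^ (c + 1) = 10 ^ c * 10 := by ring
    rw [hp]
    linarith [h]
  rw [hsplit, Int.add_mul_emod_self_left]
  have hr0 : 0 ≤ n' % 10 ^ c := Int.emod_nonneg n' (ne_of_gt hP)
  have hrP : n' % 10 ^ c < 10 ^ c := Int.emod_lt_of_pos n' hP
  have hpow : (10 : Int) ^ (c + 1) = 10 ^ c * 10 := by ring
  apply Int.emod_eq_of_lt (by omega)
  rw [hpow]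
  omega

theorem balt_eq_core : ∀ (N : Nat) (n : Int), 0 ≤ n → n.toNat ≤ N → ∀ m,
    PySem.Int.mod n (10 ^ (bScan (bDigits n []) m 0).toNat) = pvCore n m := by
  intro N
  induction N with
  | zero =>
    intro n h0 hN m
    have hn : n = 0 := by omega
    subst hn
    rw [bDigits, dif_neg (by omega), pvCore, dif_neg (by simp)]
    simp [bScan, PySem.Int.mod]
  | succ N ih =>
    intro n h0 hN m
    by_cases hp : 0 < n
    · set d := PySem.Int.mod n 10 with hd
      set n' := PySem.Int.floordiv n 10 with hn'
      have hd0 : 0 ≤ d := PySem.Int.mod_nonneg n (by norm_num)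
      have hd10 : d < 10 := PySem.Int.mod_lt n (by norm_num)
      have hn'0 : 0 ≤ n' := by
        rw [hn', PySem.Int.floordiv_eq_ediv_of_pos (by norm_num)]
        positivity
      have hn'N : n'.toNat ≤ N := by
        have := pv_fdiv10_toNat_lt n hp
        rw [← hn'] at this
        omega
      have hrepr : n' * 10 + d = n := by
        have := PySem.Int.floordiv_mul_add_mod n 10
        rw [← hn', ← hd] at this
        linarith
      rw [bDigits_pos n hp, ← hn', ← hd]
      by_cases hdm : d < m
      · rw [bScan, if_neg (by omega)]
        rw [bScan_shift _ d (0 + 1)]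
        have hc0 : 0 ≤ bScan (bDigits n' []) d 0 := bScan_nonneg _ d 0 le_rfl
        set c := (bScan (bDigits n' []) d 0).toNat with hc
        have htn : (0 + 1 + bScan (bDigits n' []) d 0).toNat = c + 1 := by omega
        rw [htn]
        rw [pvCore, dif_pos ⟨hp, by rw [← hd]; exact hdm⟩, ← hd, ← hn']
        rw [← ih n' hn'0 hn'N d]
        have hmodpos : (0 : Int) < 10 ^ (c + 1) := by positivity
        rw [PySem.Int.mod_eq_emod_of_pos hmodpos]
        rw [PySem.Int.mod_eq_emod_of_pos (by positivity : (0:Int) < 10 ^ c)]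
        rw [← hrepr]
        rw [pv_mod_tenpow_succ n' d c hd0 hd10]
        ring
      · rw [bScan, if_pos (by omega)]
        rw [pvCore, dif_neg (by rw [← hd]; tauto)]
        simp [PySem.Int.mod]
    · have hn : n = 0 := by omega
      subst hn
      rw [bDigits, dif_neg (by omega), pvCore, dif_neg (by simp)]
      simp [bScan, PySem.Int.mod]

-- ===== VERDICT (by name: the statement is the Claim_ definition above) =====
theorem longest_increasing_suffix_spec : Claim_equal_longest_increasing_suffix := by
  intro n hdom hpre
  unfold Spec_longest_increasing_suffix longest_increasing_suffix longest_increasing_suffix_alt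
  have h0 : 0 ≤ n := hpre
  have hlt : n < 10 ^ 64 := by
    have : n ≤ 2147483648 := by
      unfold Dom_longest_increasing_suffix pvDomInt at hdom
      simpa using (by simpa using hdom : -2147483648 ≤ n ∧ n ≤ 2147483648).2
    calc n ≤ 2147483648 := this
      _ < 10 ^ 64 := by norm_num
  rw [lisA_loop_eq_core 64 n 10 0 1 h0 hlt]
  rw [balt_eq_core n.toNat n h0 le_rfl 10]
  ring
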